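-- pv_equiv track=rewrite | github.com/mngcndl/Smirnova_11105 | 3 homework/task007.py | nums_before_n_that_are_prime_and_in_n_generator
-- ===== SOURCE A (Python) =====
-- def nums_before_n_that_are_prime_and_in_n_generator(n):
--     list_of_digits = list(set(list(str(n))))
--     if list_of_digits.count('0') > 0:
--         list_of_digits.__delitem__('0')
--     for i in range(1, n):
--         flag = True
--         for j in range(len(list_of_digits)):
--             if i % int(list_of_digits[j]) != 0:
--                 flag = False
--                 break
--         if flag:
--             yield i
-- ===== SOURCE B (Python) =====
-- def _gcd(a, b):
--     while b:
--         a, b = b, a % b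
--     return a
--
--
-- def nums_before_n_that_are_prime_and_in_n_generator(n):
--     if n <= 1:
--         return
--     l = 1
--     for d in set(str(n)):
--         if d != '0':
--             v = int(d)
--             l = l * v // _gcd(l, v)
--     yield from range(l, n, l)
-- ===== Notes on version B (the rewrite author's own statement) =====
-- stated objective: faster
-- what changed: Instead of scanning every i in 1..n-1 and testing divisibility by each digit, B computes the LCM L of n's distinct nonzero digits once and emits range(L, n, L) directly.
import Mathlib
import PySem

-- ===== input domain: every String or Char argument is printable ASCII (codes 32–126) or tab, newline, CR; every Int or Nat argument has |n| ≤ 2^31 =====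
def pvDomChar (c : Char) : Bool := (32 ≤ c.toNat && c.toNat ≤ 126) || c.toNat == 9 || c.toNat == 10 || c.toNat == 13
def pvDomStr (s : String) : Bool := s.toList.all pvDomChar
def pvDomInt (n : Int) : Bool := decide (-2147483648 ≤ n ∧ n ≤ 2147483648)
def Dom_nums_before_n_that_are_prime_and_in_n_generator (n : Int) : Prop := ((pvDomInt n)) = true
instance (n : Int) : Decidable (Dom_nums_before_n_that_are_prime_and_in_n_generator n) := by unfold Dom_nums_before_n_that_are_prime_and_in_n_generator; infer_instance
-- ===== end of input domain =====

-- B replaces A's scan of every i in 1..n-1 (testing each digit) by emitting the multiples of the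
-- LCM of n's distinct nonzero digits directly: range(L, n, L) — asymptotically fewer iterations.

-- ===== PORT A =====
-- int(d) for a one-character digit string d (both Pythons compute it; raises outside digits — excluded by Pre_)
def pvIntOfDigit (c : Char) : Int := (PySem.Int.ofStr? (String.ofList [c])).getD 0

-- the inner 'for j in range(len(list_of_digits))' loop with its break: flag after the loop
def pvFlagA (i : Int) : List Char → Bool
  | [] => true
  | c :: rest => if PySem.Int.mod i (pvIntOfDigit c) ≠ 0 then false else pvFlagA i rest

def nums_before_n_that_are_prime_and_in_n_generator (n : Int) : List Int :=
  let list_of_digits : List Char := PySem.Set.ofList (PySem.Int.toStr n).toList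
  if 0 < PySem.List.count list_of_digits '0' then []  -- Python raises TypeError at __delitem__('0'); excluded by Pre_
  else
    (PySem.List.pyRange 1 n 1).foldl
      (fun acc i => if pvFlagA i list_of_digits then acc ++ [i] else acc) []

-- ===== PORT B =====
-- Source B's _gcd: 'while b: a, b = b, a % b' (fuel bounds the loop; b.toNat + 2 always suffices)
def pvGcdAux : Nat → Int → Int → Int
  | 0, a, _ => a
  | f + 1, a, b => if b = 0 then a else pvGcdAux f b (PySem.Int.mod a b)

def pvGcd (a b : Int) : Int := pvGcdAux (b.toNat + 2) a b

def nums_before_n_that_are_prime_and_in_n_generator_alt (n : Int) : List Int :=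
  if n ≤ 1 then []
  else
    let l : Int :=
      (PySem.Set.ofList (PySem.Int.toStr n).toList).foldl
        (fun l c =>
          if c ≠ '0' then
            let v := pvIntOfDigit c
            PySem.Int.floordiv (l * v) (pvGcd l v)
          else l) 1
    PySem.List.pyRange l n l

-- ===== PRECONDITION & SPEC =====
-- Pre_ excludes exactly the inputs where A raises: if the decimal representation of n contains the
-- digit '0', A calls list.__delitem__('0') which raises TypeError before yielding anything.
def Pre_nums_before_n_that_are_prime_and_in_n_generator (n : Int) : Prop :=
  '0' ∉ (PySem.Int.toStr n).toList
instance (n : Int) : Decidable (Pre_nums_before_n_that_are_prime_and_in_n_generator n) := by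
  unfold Pre_nums_before_n_that_are_prime_and_in_n_generator; infer_instance

def pvWitness_nums_before_n_that_are_prime_and_in_n_generator : Int := 12

def Spec_nums_before_n_that_are_prime_and_in_n_generator (n : Int) (out : List Int) : Prop :=
  out = nums_before_n_that_are_prime_and_in_n_generator_alt n
instance (n : Int) (out : List Int) : Decidable (Spec_nums_before_n_that_are_prime_and_in_n_generator n out) := by
  unfold Spec_nums_before_n_that_are_prime_and_in_n_generator; infer_instance

-- ===== CLAIM (what is proved, stated in full; the proofs are below) =====
def Claim_equal_nums_before_n_that_are_prime_and_in_n_generator : Prop :=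
  ∀ (n : Int), Dom_nums_before_n_that_are_prime_and_in_n_generator n →
    Pre_nums_before_n_that_are_prime_and_in_n_generator n →
    Spec_nums_before_n_that_are_prime_and_in_n_generator n
      (nums_before_n_that_are_prime_and_in_n_generator n)

-- ===== LEMMAS AND PROOFS =====

lemma pvDigitChar_digit (m : Nat) (h : m < 10) :
    48 ≤ (Nat.digitChar m).toNat ∧ (Nat.digitChar m).toNat ≤ 57 := by
  interval_cases m <;> decide

lemma pvToDigitsCore_digits :
    ∀ (f m : Nat) (ds : List Char),
      (∀ c ∈ ds, 48 ≤ c.toNat ∧ c.toNat ≤ 57) →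
      ∀ c ∈ Nat.toDigitsCore 10 f m ds, 48 ≤ c.toNat ∧ c.toNat ≤ 57 := by
  intro f
  induction f with
  | zero => intro m ds h c hc; simpa [Nat.toDigitsCore] using h c (by simpa [Nat.toDigitsCore] using hc)
  | succ f ih =>
    intro m ds h c hc
    rw [Nat.toDigitsCore] at hc
    by_cases h10 : m / 10 = 0
    · rw [if_pos h10] at hc
      rcases List.mem_cons.mp hc with rfl | hc
      · exact pvDigitChar_digit _ (Nat.mod_lt _ (by norm_num))
      · exact h c hc
    · rw [if_neg h10] at hc
      refine ih (m / 10) _ ?_ c hc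
      intro d hd
      rcases List.mem_cons.mp hd with rfl | hd
      · exact pvDigitChar_digit _ (Nat.mod_lt _ (by norm_num))
      · exact h d hd

lemma pvToDigits_digits (m : Nat) :
    ∀ c ∈ Nat.toDigits 10 m, 48 ≤ c.toNat ∧ c.toNat ≤ 57 := by
  intro c hc
  exact pvToDigitsCore_digits (m + 1) m [] (by simp) c (by simpa [Nat.toDigits] using hc)

lemma pvIntOfDigit_pos (c : Char) (h1 : 49 ≤ c.toNat) (h2 : c.toNat ≤ 57) :
    0 < pvIntOfDigit c ∧ pvIntOfDigit c ≤ 9 := by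
  have hc : c = Char.ofNat c.toNat := (Char.ofNat_toNat c).symm
  have : c.toNat = 49 ∨ c.toNat = 50 ∨ c.toNat = 51 ∨ c.toNat = 52 ∨ c.toNat = 53 ∨
      c.toNat = 54 ∨ c.toNat = 55 ∨ c.toNat = 56 ∨ c.toNat = 57 := by omega
  rcases this with h | h | h | h | h | h | h | h | h <;>
    · rw [h] at hc; subst hc; decide

lemma pvFlagA_iff (i : Int) (cs : List Char) :
    pvFlagA i cs = true ↔ ∀ c ∈ cs, pvIntOfDigit c ∣ i := by
  induction cs with
  | nil => simp [pvFlagA]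
  | cons c rest ih =>
    have hdvd := PySem.Int.mod_eq_zero_iff_dvd i (pvIntOfDigit c)
    by_cases hm : pvIntOfDigit c ∣ i
    · rw [pvFlagA, if_neg (by simp [hdvd.mpr hm])]
      simp [ih, hm]
    · rw [pvFlagA, if_pos (by simpa [hdvd] using hm)]
      simp only [List.mem_cons]
      constructor
      · intro h; exact absurd h (by simp)
      · intro h; exact absurd (h c (Or.inl rfl)) hm

lemma pvGcdAux_eq :
    ∀ (f : Nat) (a b : Int), 0 ≤ a → 0 ≤ b → b.toNat < f →
      pvGcdAux f a b = ((a.toNat.gcd b.toNat : Nat) : Int) := by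
  intro f
  induction f with
  | zero => intro a b _ _ h; omega
  | succ f ih =>
    intro a b ha hb hf
    by_cases hb0 : b = 0
    · subst hb0
      simp [pvGcdAux, Int.toNat_of_nonneg ha]
    · have hbpos : 0 < b := lt_of_le_of_ne hb (Ne.symm hb0)
      rw [pvGcdAux, if_neg hb0, PySem.Int.mod_eq_emod_of_pos hbpos]
      have hmn : 0 ≤ a % b := Int.emod_nonneg a hb0
      have hlt : a % b < b := Int.emod_lt_of_pos a hbpos
      have : (a % b).toNat < f := by omega
      rw [ih b (a % b) hb hmn this]
      congr 1
      have hcast : a % b = ((a.toNat % b.toNat : Nat) : Int) := by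
        conv_lhs => rw [← Int.toNat_of_nonneg ha, ← Int.toNat_of_nonneg hb]
        push_cast
        rfl
      rw [show (a % b).toNat = a.toNat % b.toNat by omega]
      rw [Nat.gcd_comm b.toNat, ← Nat.gcd_rec, Nat.gcd_comm]

lemma pvGcd_eq (a b : Int) (ha : 0 ≤ a) (hb : 0 ≤ b) :
    pvGcd a b = ((a.toNat.gcd b.toNat : Nat) : Int) :=
  pvGcdAux_eq (b.toNat + 2) a b ha hb (by omega)

lemma pvStep_lcm (L0 : Nat) (v : Int) (hL : 0 < L0) (hv : 0 < v) :
    PySem.Int.floordiv ((L0 : Int) * v) (pvGcd (L0 : Int) v) = ((Nat.lcm L0 v.toNat : Nat) : Int) := by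
  have hg := pvGcd_eq (L0 : Int) v (by positivity) (le_of_lt hv)
  rw [hg]
  have hgpos : 0 < (L0.gcd v.toNat) := Nat.gcd_pos_of_pos_left _ hL
  rw [PySem.Int.floordiv_eq_ediv_of_pos (by exact_mod_cast hgpos)]
  have hvc : v = ((v.toNat : Nat) : Int) := (Int.toNat_of_nonneg (le_of_lt hv)).symm
  rw [hvc]
  rw [show ((L0 : Int) * (v.toNat : Int)) = ((L0 * v.toNat : Nat) : Int) by push_cast; ring]
  rw [← Int.natCast_div]
  rfl

def pvStepB (l : Int) (c : Char) : Int :=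
  if c ≠ '0' then PySem.Int.floordiv (l * pvIntOfDigit c) (pvGcd l (pvIntOfDigit c)) else l

def pvFoldNat (cs : List Char) (L0 : Nat) : Nat :=
  cs.foldl (fun L c => Nat.lcm L (pvIntOfDigit c).toNat) L0

lemma pvFoldNat_pos (cs : List Char) (h : ∀ c ∈ cs, 0 < pvIntOfDigit c) :
    ∀ L0 : Nat, 0 < L0 → 0 < pvFoldNat cs L0 := by
  induction cs with
  | nil => intro L0 hL0; simpa [pvFoldNat] using hL0
  | cons c rest ih =>
    intro L0 hL0
    have hc := h c (List.mem_cons_self ..)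
    have : 0 < Nat.lcm L0 (pvIntOfDigit c).toNat :=
      Nat.pos_of_ne_zero (fun hz => by
        rcases Nat.lcm_eq_zero_iff .. |>.mp hz with h0 | h0 <;> omega)
    exact ih (fun d hd => h d (List.mem_cons_of_mem _ hd)) _ this

lemma pvFoldB_eq (cs : List Char) (h : ∀ c ∈ cs, c ≠ '0' ∧ 0 < pvIntOfDigit c) :
    ∀ L0 : Nat, 0 < L0 →
      cs.foldl pvStepB (L0 : Int) = ((pvFoldNat cs L0 : Nat) : Int) := by
  induction cs with
  | nil => intro L0 _; simp [pvFoldNat]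
  | cons c rest ih =>
    intro L0 hL0
    obtain ⟨hc0, hcpos⟩ := h c (List.mem_cons_self ..)
    have hstep : pvStepB (L0 : Int) c = ((Nat.lcm L0 (pvIntOfDigit c).toNat : Nat) : Int) := by
      rw [pvStepB, if_pos hc0]
      exact pvStep_lcm L0 _ hL0 hcpos
    have hpos : 0 < Nat.lcm L0 (pvIntOfDigit c).toNat :=
      Nat.pos_of_ne_zero (fun hz => by
        rcases Nat.lcm_eq_zero_iff .. |>.mp hz with h0 | h0 <;> omega)
    calc (c :: rest).foldl pvStepB (L0 : Int)
        = rest.foldl pvStepB ((Nat.lcm L0 (pvIntOfDigit c).toNat : Nat) : Int) := by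
          rw [List.foldl_cons, hstep]
      _ = ((pvFoldNat rest (Nat.lcm L0 (pvIntOfDigit c).toNat) : Nat) : Int) :=
          ih (fun d hd => h d (List.mem_cons_of_mem _ hd)) _ hpos
      _ = ((pvFoldNat (c :: rest) L0 : Nat) : Int) := by simp [pvFoldNat]

lemma pvNatLcm_dvd_int (a b : Nat) (i : Int) :
    ((Nat.lcm a b : Nat) : Int) ∣ i ↔ (a : Int) ∣ i ∧ (b : Int) ∣ i := by
  rw [Int.natCast_dvd, Int.natCast_dvd, Int.natCast_dvd]
  exact ⟨fun h => ⟨dvd_trans (Nat.dvd_lcm_left a b) h, dvd_trans (Nat.dvd_lcm_right a b) h⟩,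
    fun ⟨h1, h2⟩ => Nat.lcm_dvd h1 h2⟩

lemma pvFoldNat_dvd_iff (cs : List Char) (h : ∀ c ∈ cs, 0 < pvIntOfDigit c) :
    ∀ (L0 : Nat) (i : Int),
      ((pvFoldNat cs L0 : Nat) : Int) ∣ i ↔ ((L0 : Nat) : Int) ∣ i ∧ ∀ c ∈ cs, pvIntOfDigit c ∣ i := by
  induction cs with
  | nil => intro L0 i; simp [pvFoldNat]
  | cons c rest ih =>
    intro L0 i
    have hc := h c (List.mem_cons_self ..)
    have hrec := ih (fun d hd => h d (List.mem_cons_of_mem _ hd)) (Nat.lcm L0 (pvIntOfDigit c).toNat) i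
    have hfold : pvFoldNat (c :: rest) L0 = pvFoldNat rest (Nat.lcm L0 (pvIntOfDigit c).toNat) := by
      simp [pvFoldNat]
    rw [hfold, hrec, pvNatLcm_dvd_int]
    have hcv : (((pvIntOfDigit c).toNat : Nat) : Int) = pvIntOfDigit c :=
      Int.toNat_of_nonneg (le_of_lt hc)
    rw [hcv]
    constructor
    · rintro ⟨⟨hL, hcd⟩, hrest⟩
      exact ⟨hL, fun d hd => by
        rcases List.mem_cons.mp hd with rfl | hd
        · exact hcd
        · exact hrest d hd⟩
    · rintro ⟨hL, hall⟩
      exact ⟨⟨hL, hall c (List.mem_cons_self ..)⟩, fun d hd => hall d (List.mem_cons_of_mem _ hd)⟩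

lemma pvFilter_range_eq (L n : Int) (hL : 1 ≤ L) :
    (PySem.List.pyRange 1 n 1).filter (fun i => decide (L ∣ i)) = PySem.List.pyRange L n L := by
  have hL0 : 0 < L := hL
  have hpw1 : ((PySem.List.pyRange 1 n 1).filter (fun i => decide (L ∣ i))).Pairwise (· < ·) :=
    (PySem.List.pairwise_lt_pyRange_one 1 n).filter _
  have hpw2 : (PySem.List.pyRange L n L).Pairwise (· < ·) := by
    rw [PySem.List.pyRange_of_pos L n hL0]
    refine List.pairwise_map.mpr (List.pairwise_lt_range.imp ?_)
    intro a b hab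
    have : L * (a : Int) < L * (b : Int) := by
      apply mul_lt_mul_of_pos_left _ hL0
      exact_mod_cast hab
    omega
  have hmem : ∀ x : Int,
      x ∈ (PySem.List.pyRange 1 n 1).filter (fun i => decide (L ∣ i)) ↔
      x ∈ PySem.List.pyRange L n L := by
    intro x
    rw [List.mem_filter, PySem.List.mem_pyRange_one, PySem.List.mem_pyRange_iff_of_pos hL0]
    simp only [decide_eq_true_eq]
    constructor
    · rintro ⟨⟨h1, h2⟩, hd⟩
      refine ⟨Int.le_of_dvd (by omega) hd, h2, ?_⟩
      exact dvd_sub hd dvd_rfl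
    · rintro ⟨h1, h2, hd⟩
      have hdx : L ∣ x := by
        have : x = (x - L) + L := by ring
        rw [this]; exact dvd_add hd dvd_rfl
      exact ⟨⟨by omega, h2⟩, hdx⟩
  have hnd1 : ((PySem.List.pyRange 1 n 1).filter (fun i => decide (L ∣ i))).Nodup :=
    hpw1.imp (fun h => ne_of_lt h)
  have hnd2 : (PySem.List.pyRange L n L).Nodup := hpw2.imp (fun h => ne_of_lt h)
  have hperm : (PySem.List.pyRange L n L).Perm
      ((PySem.List.pyRange 1 n 1).filter (fun i => decide (L ∣ i))) :=
    (List.perm_ext_iff_of_nodup hnd2 hnd1).mpr (fun x => (hmem x).symm)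
  have e1 := PySem.List.sorted_eq_of_perm_of_pairwise_lt
    ((PySem.List.pyRange 1 n 1).filter (fun i => decide (L ∣ i)))
    ((PySem.List.pyRange 1 n 1).filter (fun i => decide (L ∣ i)))
    (fun x => x) (List.Perm.refl _) hpw1
  have e2 := PySem.List.sorted_eq_of_perm_of_pairwise_lt
    ((PySem.List.pyRange 1 n 1).filter (fun i => decide (L ∣ i)))
    (PySem.List.pyRange L n L) (fun x => x) hperm hpw2
  rw [← e1, e2]

-- ===== VERDICT (by name: the statement is the Claim_ definition above) =====
theorem nums_before_n_that_are_prime_and_in_n_generator_spec :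
    Claim_equal_nums_before_n_that_are_prime_and_in_n_generator := by
  intro n _ hPre
  unfold Spec_nums_before_n_that_are_prime_and_in_n_generator
  unfold Pre_nums_before_n_that_are_prime_and_in_n_generator at hPre
  simp only [nums_before_n_that_are_prime_and_in_n_generator,
    nums_before_n_that_are_prime_and_in_n_generator_alt]
  set cs : List Char := PySem.Set.ofList (PySem.Int.toStr n).toList with hcs
  have h0cs : '0' ∉ cs := fun h => hPre ((PySem.Set.mem_ofList _ _).mp h)
  have hcount : ¬ 0 < PySem.List.count cs '0' := by
    have : PySem.List.count cs '0' = 0 := by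
      simp [PySem.List.count, List.count_eq_zero, h0cs]
    omega
  rw [if_neg hcount]
  rw [PySem.List.foldl_append_if_eq_filter (fun i => pvFlagA i cs)]
  rw [List.nil_append]
  by_cases hn : n ≤ 1
  · rw [if_pos hn, PySem.List.pyRange_one_eq_nil hn, List.filter_nil]
  · rw [if_neg hn]
    have hnneg : ¬ n < 0 := by omega
    have hdig : ∀ c ∈ cs, 48 ≤ c.toNat ∧ c.toNat ≤ 57 := by
      intro c hc
      have hc' : c ∈ (PySem.Int.toStr n).toList := (PySem.Set.mem_ofList _ _).mp hc
      rw [PySem.Int.toList_toStr] at hc'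
      unfold PySem.Int.toChars at hc'
      rw [if_neg hnneg] at hc'
      exact pvToDigits_digits _ c hc'
    have hprop : ∀ c ∈ cs, c ≠ '0' ∧ 0 < pvIntOfDigit c := by
      intro c hc
      have hd := hdig c hc
      have hne : c ≠ '0' := fun h => h0cs (h ▸ hc)
      have h49 : 49 ≤ c.toNat := by
        rcases Nat.eq_or_lt_of_le hd.1 with h | h
        · exfalso; apply hne; rw [← Char.ofNat_toNat c, ← h]
        · omega
      exact ⟨hne, (pvIntOfDigit_pos c h49 hd.2).1⟩
    have hpos : ∀ c ∈ cs, 0 < pvIntOfDigit c := fun c hc => (hprop c hc).2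
    have hLpos : 0 < pvFoldNat cs 1 := pvFoldNat_pos cs hpos 1 one_pos
    have hfun : cs.foldl
        (fun l c => if c ≠ '0' then
          let v := pvIntOfDigit c
          PySem.Int.floordiv (l * v) (pvGcd l v)
        else l) (1 : Int) = cs.foldl pvStepB (1 : Int) := rfl
    rw [hfun]
    have hB := pvFoldB_eq cs hprop 1 one_pos
    rw [show ((1 : Nat) : Int) = (1 : Int) by norm_num] at hB
    rw [hB]
    have hfilt : ∀ i ∈ PySem.List.pyRange 1 n 1,
        pvFlagA i cs = decide (((pvFoldNat cs 1 : Nat) : Int) ∣ i) := by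
      intro i _
      by_cases hd : ((pvFoldNat cs 1 : Nat) : Int) ∣ i
      · rw [decide_eq_true hd]
        exact (pvFlagA_iff i cs).mpr
          (fun c hc => ((pvFoldNat_dvd_iff cs hpos 1 i).mp hd).2 c hc)
      · rw [decide_eq_false hd]
        cases hF : pvFlagA i cs with
        | false => rfl
        | true =>
          exfalso
          exact hd ((pvFoldNat_dvd_iff cs hpos 1 i).mpr
            ⟨by simp, (pvFlagA_iff i cs).mp hF⟩)
    rw [List.filter_congr hfilt,
      pvFilter_range_eq _ n (by exact_mod_cast hLpos)]
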